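-- pv_equiv track=rewrite | github.com/Sehktel/LogicSelector | ls_5.py | find_mask2
-- ===== SOURCE A (Python) =====
-- def find_mask2(sequence):
--     length = len(sequence[0])
--     common_mask = ""
--     for i in range(length):
--         if all(s[i] == sequence[0][i] for s in sequence):
--             common_mask += sequence[0][i]
--         else:
--             if sequence[0][i] == 'x' and sequence[1][i] == 't':
--                 common_mask += "x"
--             elif sequence[0][i] == 't' and sequence[1][i] == 'x':
--                 common_mask += "x"
--             else:
--                 common_mask += "x"
--
--     return common_mask
-- ===== SOURCE B (Python) =====
-- def find_mask2(sequence):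
--     first = sequence[0]
--     mask = list(first)
--     for s in sequence[1:]:
--         for i in range(len(first)):
--             if s[i] != first[i]:
--                 mask[i] = 'x'
--     return ''.join(mask)
-- ===== Notes on version B (the rewrite author's own statement) =====
-- stated objective: alternative
-- what changed: B traverses row-major maintaining a running mask list updated per later sequence, instead of A's column-major loop with an all() scan over all sequences per column.
-- outside the precondition, e.g. on find_mask2(['ab', 'xy', 'z']): A returns 'xx', B raises IndexError
import Mathlib
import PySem

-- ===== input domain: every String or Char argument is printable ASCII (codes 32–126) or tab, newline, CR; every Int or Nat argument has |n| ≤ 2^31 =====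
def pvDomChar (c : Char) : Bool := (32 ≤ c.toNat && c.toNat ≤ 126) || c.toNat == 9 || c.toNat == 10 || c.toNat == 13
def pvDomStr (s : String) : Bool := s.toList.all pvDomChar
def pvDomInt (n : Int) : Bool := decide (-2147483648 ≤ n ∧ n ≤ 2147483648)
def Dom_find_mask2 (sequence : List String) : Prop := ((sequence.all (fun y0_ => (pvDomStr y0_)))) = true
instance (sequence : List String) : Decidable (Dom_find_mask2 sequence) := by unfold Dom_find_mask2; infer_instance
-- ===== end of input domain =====

-- B maintains a running mask row-major (one pass per later sequence) instead of A's
-- column-major loop with an all() scan per column; equivalence is about the return value.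

-- ===== PORT A =====
-- A: for each column i, append the shared char if all rows agree there, else 'x'
-- (the three else-branches of A all append 'x'; they are kept in order).
def find_mask2 (sequence : List String) : String :=
  let first := (sequence.headD "").toList
  let length := first.length
  ((List.range length).foldl (fun acc i =>
    if sequence.all (fun s => s.toList.getD i ' ' == first.getD i ' ') then
      acc ++ [first.getD i ' ']
    else
      let c0 := first.getD i ' '
      let c1 := ((sequence.getD 1 "").toList).getD i ' '
      if c0 == 'x' && c1 == 't' then acc ++ ['x']
      else if c0 == 't' && c1 == 'x' then acc ++ ['x']
      else acc ++ ['x']) []) |> String.ofList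

-- ===== PORT B =====
-- B: start from the first row as the mask; for each later row set mismatching columns to 'x'.
def find_mask2_alt (sequence : List String) : String :=
  let first := (sequence.headD "").toList
  (sequence.tail.foldl (fun mask s =>
    (List.range first.length).foldl (fun mask i =>
      if s.toList.getD i ' ' != first.getD i ' ' then mask.set i 'x' else mask) mask)
    first) |> String.ofList

-- ===== PRECONDITION & SPEC =====
-- Pre_ excludes the empty list and lists with a row shorter than the first row: there A
-- raises IndexError, except when short-circuit evaluation of all() happens to skip the
-- short row (A then returns a value by accident); B's natural row-major loop raises there.
def Pre_find_mask2 (sequence : List String) : Prop :=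
  sequence ≠ [] ∧ ∀ s ∈ sequence, (sequence.headD "").toList.length ≤ s.toList.length
instance (sequence : List String) : Decidable (Pre_find_mask2 sequence) := by
  unfold Pre_find_mask2; infer_instance
def pvWitness_find_mask2 : List String := ["abc", "axc", "abd"]
def Spec_find_mask2 (sequence : List String) (out : String) : Prop := out = find_mask2_alt sequence
instance (sequence : List String) (out : String) : Decidable (Spec_find_mask2 sequence out) := by unfold Spec_find_mask2; infer_instance

-- ===== CLAIM (what is proved, stated in full; the proofs are below) =====
def Claim_equal_find_mask2 : Prop := ∀ (sequence : List String), Dom_find_mask2 sequence → Pre_find_mask2 sequence → Spec_find_mask2 sequence (find_mask2 sequence)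

-- ===== LEMMAS AND PROOFS =====

-- A's append-fold over range is a map.
theorem foldl_append_map {α : Type} (f : Nat → α) (n : Nat) :
    (List.range n).foldl (fun acc i => acc ++ [f i]) [] = (List.range n).map f := by
  induction n with
  | zero => simp
  | succ n ih => simp [List.range_succ, ih]

theorem inner_length (p : Nat → Bool) (mask : List Char) (l : List Nat) :
    (l.foldl (fun m i => if p i then m.set i 'x' else m) mask).length = mask.length := by
  induction l generalizing mask with
  | nil => rfl
  | cons i l ih =>
      simp only [List.foldl_cons]
      split <;> simp [ih]

-- inner fold: pointwise value after sweeping columns 0..n-1 for one row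
theorem inner_getD (p : Nat → Bool) (mask : List Char) (n : Nat) (hn : n ≤ mask.length) (j : Nat) :
    ((List.range n).foldl (fun m i => if p i then m.set i 'x' else m) mask).getD j ' '
      = if j < n ∧ p j then 'x' else mask.getD j ' ' := by
  induction n with
  | zero => simp
  | succ n ih =>
      have hn' : n ≤ mask.length := Nat.le_of_succ_le hn
      have hlen := inner_length p mask (List.range n)
      rw [List.range_succ, List.foldl_append, List.foldl_cons, List.foldl_nil]
      by_cases hp : p n = true
      · rw [if_pos hp, List.getD_eq_getElem?_getD, List.getElem?_set, hlen]
        by_cases hj : j = n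
        · subst hj
          simp [Nat.lt_of_succ_le hn, hp]
        · rw [if_neg (fun h => hj h.symm), ← List.getD_eq_getElem?_getD, ih hn']
          refine (if_congr ?_ rfl rfl).symm
          constructor
          · rintro ⟨h1, h2⟩; exact ⟨by omega, h2⟩
          · rintro ⟨h1, h2⟩; exact ⟨Nat.lt_succ_of_lt h1, h2⟩
      · rw [if_neg hp, ih hn']
        refine (if_congr ?_ rfl rfl).symm
        constructor
        · rintro ⟨h1, h2⟩
          rcases Nat.lt_succ_iff_lt_or_eq.mp h1 with h | h
          · exact ⟨h, h2⟩
          · exact absurd (h ▸ h2) hp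
        · rintro ⟨h1, h2⟩; exact ⟨Nat.lt_succ_of_lt h1, h2⟩

-- outer fold: pointwise value after sweeping all later rows
theorem outer_getD (first : List Char) (ts : List String) (mask : List Char)
    (hm : mask.length = first.length) (j : Nat) (hj : j < first.length) :
    (ts.foldl (fun mask s =>
        (List.range first.length).foldl (fun mask i =>
          if s.toList.getD i ' ' != first.getD i ' ' then mask.set i 'x' else mask) mask) mask).getD j ' '
      = if ∀ s ∈ ts, s.toList.getD j ' ' = first.getD j ' ' then mask.getD j ' ' else 'x' := by
  induction ts generalizing mask with
  | nil => simp
  | cons s ts ih =>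
      simp only [List.foldl_cons]
      set p : Nat → Bool := fun i => s.toList.getD i ' ' != first.getD i ' ' with hp
      have hlen : ((List.range first.length).foldl
          (fun m i => if p i then m.set i 'x' else m) mask).length = first.length := by
        rw [inner_length]; exact hm
      rw [ih _ hlen]
      have hinner := inner_getD p mask first.length (le_of_eq hm.symm) j
      by_cases hs : s.toList.getD j ' ' = first.getD j ' '
      · have hpj : p j = false := by simp only [hp]; simp; exact hs
        rw [hinner,
          if_neg (show ¬(j < first.length ∧ p j = true) by simp [hpj])]
        have hs' : s.toList[j]?.getD ' ' = first[j]?.getD ' ' := hs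
        simp [hs']
      · have hpj : p j = true := by simp only [hp]; simp; exact hs
        rw [hinner, if_pos (show j < first.length ∧ p j = true from ⟨hj, hpj⟩),
          ite_self]
        rw [if_neg (show ¬∀ t ∈ s :: ts, t.toList.getD j ' ' = first.getD j ' '
          from fun h => hs (h s (by simp)))]

theorem outer_length (first : List Char) (ts : List String) (mask : List Char) :
    (ts.foldl (fun mask s =>
        (List.range first.length).foldl (fun mask i =>
          if s.toList.getD i ' ' != first.getD i ' ' then mask.set i 'x' else mask) mask) mask).length
      = mask.length := by
  induction ts generalizing mask with
  | nil => rfl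
  | cons s ts ih => simp only [List.foldl_cons]; rw [ih, inner_length]

-- ===== VERDICT (by name: the statement is the Claim_ definition above) =====
theorem find_mask2_spec : Claim_equal_find_mask2 := by
  intro sequence _ hpre
  obtain ⟨hne, _⟩ := hpre
  obtain ⟨s0, ts, rfl⟩ := List.exists_cons_of_ne_nil hne
  unfold Spec_find_mask2 find_mask2 find_mask2_alt
  simp only [List.headD_cons, List.tail_cons]
  congr 1
  -- A side: collapse the three 'x' branches and turn the fold into a map
  have hA : (List.range s0.toList.length).foldl (fun acc i =>
      if (s0 :: ts).all (fun s => s.toList.getD i ' ' == s0.toList.getD i ' ') then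
        acc ++ [s0.toList.getD i ' ']
      else
        if s0.toList.getD i ' ' == 'x' && ((s0 :: ts).getD 1 "").toList.getD i ' ' == 't' then acc ++ ['x']
        else if s0.toList.getD i ' ' == 't' && ((s0 :: ts).getD 1 "").toList.getD i ' ' == 'x' then acc ++ ['x']
        else acc ++ ['x']) []
      = (List.range s0.toList.length).map (fun i =>
          if (s0 :: ts).all (fun s => s.toList.getD i ' ' == s0.toList.getD i ' ') then
            s0.toList.getD i ' ' else 'x') := by
    rw [← foldl_append_map]
    apply PySem.List.foldl_congr_mem
    intro acc i _
    by_cases h : (s0 :: ts).all (fun s => s.toList.getD i ' ' == s0.toList.getD i ' ') = true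
    · rw [if_pos h, if_pos h]
    · rw [if_neg h, if_neg h]
      split <;> [rfl; split <;> rfl]
  refine hA.trans ?_
  -- B side: pointwise characterisation of the final mask
  have hBlen := outer_length s0.toList ts s0.toList
  apply List.ext_getElem
  · rw [List.length_map, List.length_range]; exact hBlen.symm
  · intro j h1 h2
    have hj : j < s0.toList.length := by simpa using h1
    have hgB := outer_getD s0.toList ts s0.toList rfl j hj
    have e2 := (List.getD_eq_getElem _ ' ' h2).symm
    rw [List.getElem_map, List.getElem_range]
    refine Eq.trans ?_ e2.symm
    refine Eq.trans ?_ hgB.symm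
    by_cases h : ∀ t ∈ ts, t.toList.getD j ' ' = s0.toList.getD j ' '
    · rw [if_pos h, if_pos]
      simp only [List.all_cons, List.all_eq_true, beq_self_eq_true, Bool.true_and]
      intro s hsmem
      exact beq_iff_eq.mpr (h s hsmem)
    · rw [if_neg h, if_neg]
      simp only [List.all_cons, List.all_eq_true, beq_self_eq_true, Bool.true_and]
      intro hall
      exact h (fun s hsmem => beq_iff_eq.mp (hall s hsmem))
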